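-- pv_equiv track=rewrite | github.com/GundalaNikhil/DSA | dsa-problems/Bitwise/testcases/comprehensive_generator.py | sol_014
-- ===== SOURCE A (Python) =====
-- def sol_014(L: int, R: int) -> int:
--     """BIT-014: Bitwise Palindromes With Balanced Ones"""
--     count = 0
--     limit = min(R + 1, L + 200000)  # Limit for large ranges
--     for num in range(L, limit):
--         if num > R:
--             break
--         bin_str = bin(num)[2:]
--         if bin_str == bin_str[::-1] and bin_str.count('1') % 2 == 0:
--             count += 1
--     return count
-- ===== SOURCE B (Python) =====
-- def sol_014(L: int, R: int) -> int:
--     """BIT-014: enumerate binary palindromes directly by mirroring half-bit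
--     strings instead of scanning every number in the (capped) range."""
--     hi = min(R, L + 199999)
--     count = 1 if L <= 0 <= hi else 0  # 0 is the only counted non-positive value
--     if hi >= 1:
--         nbits = hi.bit_length()
--         for h in range(1, (nbits + 1) // 2 + 1):
--             for half in range(1 << (h - 1), 1 << h):
--                 s = bin(half)[2:]
--                 for pal in (s + s[:-1][::-1], s + s[::-1]):
--                     if len(pal) > nbits:
--                         continue
--                     p = int(pal, 2)
--                     if L <= p <= hi and pal.count('1') % 2 == 0:
--                         count += 1
--     return count
-- ===== Notes on version B (the rewrite author's own statement) =====
-- stated objective: alternative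
-- what changed: B counts by directly enumerating all binary palindromes up to the capped upper bound (mirroring every half-bit string to its odd- and even-length palindrome) and filtering for range and even 1-bit count, instead of A's scan over every number in the capped range testing each bin-string.
import Mathlib
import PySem

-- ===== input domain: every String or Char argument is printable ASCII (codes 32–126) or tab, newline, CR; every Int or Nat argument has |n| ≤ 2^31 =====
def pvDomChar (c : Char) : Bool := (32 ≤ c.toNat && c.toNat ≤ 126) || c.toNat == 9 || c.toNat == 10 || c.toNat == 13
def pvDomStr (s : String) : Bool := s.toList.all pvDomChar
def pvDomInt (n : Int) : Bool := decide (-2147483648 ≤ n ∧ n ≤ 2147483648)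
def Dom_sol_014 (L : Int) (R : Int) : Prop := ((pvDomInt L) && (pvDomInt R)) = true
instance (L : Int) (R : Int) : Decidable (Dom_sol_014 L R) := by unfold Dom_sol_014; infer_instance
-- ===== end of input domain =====

-- B enumerates binary palindromes directly by mirroring half-bit strings instead of
-- scanning every number of the (capped) range; objective: alternative algorithm.

-- Shared digit helper: the binary digit string of a nonneg integer, as Python's
-- bin(n)[2:] produces for n ≥ 1 (MSB first, chars '0'/'1'); binDigits 0 = [].
def binDigits (n : ℕ) : List Char :=
  if h : n = 0 then [] else binDigits (n / 2) ++ [if n % 2 = 1 then '1' else '0']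
decreasing_by exact Nat.div_lt_self (Nat.pos_of_ne_zero h) one_lt_two

-- ===== PORT A =====
-- bin(num)[2:] as a list of chars, exact for every int:
-- bin(-5) = '-0b101' so bin(-5)[2:] = 'b101'; bin(0)[2:] = '0'.
def pyBin (n : Int) : List Char :=
  if n < 0 then 'b' :: binDigits (-n).toNat
  else if n = 0 then ['0'] else binDigits n.toNat

-- the for-loop of A, with its (dead in fact) break
def loopA (R : Int) : List Int → Int → Int
  | [], count => count
  | num :: rest, count =>
    if num > R then count
    else
      let bs := pyBin num
      if bs = bs.reverse ∧ bs.count '1' % 2 = 0 then loopA R rest (count + 1)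
      else loopA R rest count

def sol_014 (L : Int) (R : Int) : Int :=
  loopA R (PySem.List.pyRange L (min (R + 1) (L + 200000)) 1) 0

-- ===== PORT B =====
-- int.bit_length() for n ≥ 0
def bitLen (n : ℕ) : ℕ :=
  if h : n = 0 then 0 else bitLen (n / 2) + 1
decreasing_by exact Nat.div_lt_self (Nat.pos_of_ne_zero h) one_lt_two

-- int(pal, 2): exact on strings of '0'/'1' chars (the only ones B builds)
def intOfBin (s : List Char) : ℕ :=
  s.foldl (fun a c => 2 * a + (if c = '1' then 1 else 0)) 0

-- transliteration of Source B: the nested for-loops are folds over the same ranges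
-- (all loop bounds are nonnegative, so Nat ranges are exact)
def sol_014_alt (L : Int) (R : Int) : Int :=
  let hi := min R (L + 199999)
  let count : Int := if L ≤ 0 ∧ 0 ≤ hi then 1 else 0
  if 1 ≤ hi then
    let nbits := bitLen hi.toNat
    (List.range' 1 ((nbits + 1) / 2)).foldl (fun count h =>
      (List.range' (2 ^ (h - 1)) (2 ^ h - 2 ^ (h - 1))).foldl (fun count half =>
        let s := binDigits half
        [s ++ s.dropLast.reverse, s ++ s.reverse].foldl (fun count pal =>
          if pal.length > nbits then count
          else
            if L ≤ (intOfBin pal : Int) ∧ (intOfBin pal : Int) ≤ hi ∧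
                pal.count '1' % 2 = 0 then count + 1 else count)
          count) count) count
  else count

-- ===== PRECONDITION & SPEC =====
def Spec_sol_014 (L : Int) (R : Int) (out : Int) : Prop := out = sol_014_alt L R
instance (L : Int) (R : Int) (out : Int) : Decidable (Spec_sol_014 L R out) := by unfold Spec_sol_014; infer_instance

-- ===== CLAIM (what is proved, stated in full; the proofs are below) =====
def Claim_equal_sol_014 : Prop := ∀ (L : Int) (R : Int), Dom_sol_014 L R → Spec_sol_014 L R (sol_014 L R)

-- ===== LEMMAS AND PROOFS =====

theorem binDigits_zero : binDigits 0 = [] := by unfold binDigits; simp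
theorem binDigits_pos (n : ℕ) (h : n ≠ 0) :
    binDigits n = binDigits (n / 2) ++ [if n % 2 = 1 then '1' else '0'] := by
  rw [binDigits]; simp [h]
theorem binDigits_eq_nil_iff (n : ℕ) : binDigits n = [] ↔ n = 0 := by
  constructor
  · intro h; by_contra hn; rw [binDigits_pos n hn] at h; simp at h
  · rintro rfl; exact binDigits_zero

theorem intOfBin_append (s : List Char) (c : Char) :
    intOfBin (s ++ [c]) = 2 * intOfBin s + (if c = '1' then 1 else 0) := by
  simp [intOfBin, List.foldl_append]

theorem intOfBin_binDigits (n : ℕ) : intOfBin (binDigits n) = n := by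
  induction n using binDigits.induct with
  | case1 => simp [binDigits_zero, intOfBin]
  | case2 n h ih =>
    rw [binDigits_pos n h, intOfBin_append, ih]
    rcases Nat.mod_two_eq_zero_or_one n with h2 | h2 <;> simp [h2] <;> omega

theorem length_binDigits (n : ℕ) : (binDigits n).length = bitLen n := by
  induction n using binDigits.induct with
  | case1 => simp [binDigits_zero, bitLen]
  | case2 n h ih => rw [binDigits_pos n h, bitLen]; simp [h, ih]

theorem bitLen_le_iff (k n : ℕ) : bitLen n ≤ k ↔ n < 2 ^ k := by
  induction k generalizing n with
  | zero =>
    simp only [Nat.le_zero, pow_zero, Nat.lt_one_iff]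
    constructor <;> intro h
    · by_contra hn; rw [bitLen] at h; simp [hn] at h
    · rw [h, bitLen]; simp
  | succ k ih =>
    by_cases hn : n = 0
    · subst hn; rw [bitLen]; simp
    · rw [bitLen]; simp only [hn, dif_neg, not_false_iff]
      rw [Nat.succ_le_succ_iff, ih, pow_succ]
      omega

theorem mem_binDigits (n : ℕ) (c : Char) (h : c ∈ binDigits n) : c = '0' ∨ c = '1' := by
  induction n using binDigits.induct with
  | case1 => simp [binDigits_zero] at h
  | case2 n hn ih =>
    rw [binDigits_pos n hn] at h
    rcases List.mem_append.1 h with h | h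
    · exact ih h
    · simp at h; split at h <;> simp [h]

theorem head_binDigits (n : ℕ) (h : n ≠ 0) : (binDigits n).head? = some '1' := by
  induction n using binDigits.induct with
  | case1 => omega
  | case2 n hn ih =>
    rw [binDigits_pos n hn]
    by_cases h2 : n / 2 = 0
    · rw [h2, binDigits_zero]; simp
      have : n % 2 = 1 := by omega
      simp [this]
    · rw [List.head?_append_of_ne_nil _ (by simp [binDigits_eq_nil_iff, h2])]
      exact ih h2

def Bin01 (s : List Char) : Prop := ∀ c ∈ s, c = '0' ∨ c = '1'

theorem intOfBin_pos (s : List Char) (h0 : s.head? = some '1') : 1 ≤ intOfBin s := by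
  rcases s with _ | ⟨c, t⟩
  · simp at h0
  · simp at h0; subst h0
    show 1 ≤ List.foldl _ (2 * 0 + (if ('1':Char) = '1' then 1 else 0)) t
    simp only [if_pos rfl]
    have : ∀ (t : List Char) (a : ℕ), 1 ≤ a → 1 ≤ t.foldl (fun a c => 2 * a + (if c = '1' then 1 else 0)) a := by
      intro t
      induction t with
      | nil => intro a ha; simpa using ha
      | cons c t ih => intro a ha; exact ih _ (by simp only []; split <;> omega)
    exact this t 1 le_rfl

theorem binDigits_intOfBin (s : List Char) (hb : Bin01 s) (h0 : s.head? = some '1') :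
    binDigits (intOfBin s) = s := by
  induction s using List.reverseRecOn with
  | nil => simp at h0
  | append_singleton t c ih =>
    rw [intOfBin_append]
    rcases t with _ | ⟨d, u⟩
    · simp at h0; subst h0
      simp [intOfBin]
      rw [binDigits_pos 1 (by omega)]
      norm_num [binDigits_zero]
    · have hd : (d :: u).head? = some '1' := by simpa using h0
      have hbt : Bin01 (d :: u) := fun x hx => hb x (List.mem_append_left _ hx)
      have h1 : 1 ≤ intOfBin (d :: u) := intOfBin_pos _ hd
      have hc : c = '0' ∨ c = '1' := hb c (by simp)
      have hbit : (if c = '1' then 1 else 0) < 2 := by split <;> omega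
      rw [binDigits_pos _ (by omega)]
      have hq : (2 * intOfBin (d :: u) + (if c = '1' then 1 else 0)) / 2 = intOfBin (d :: u) := by omega
      have hr : (2 * intOfBin (d :: u) + (if c = '1' then 1 else 0)) % 2 = (if c = '1' then 1 else 0) := by omega
      rw [hq, hr, ih hbt hd]
      congr 1
      rcases hc with rfl | rfl <;> simp

-- palindrome construction
theorem pal_even (s : List Char) : (s ++ s.reverse).reverse = s ++ s.reverse := by
  simp
theorem pal_odd (s : List Char) : (s ++ s.dropLast.reverse).reverse = s ++ s.dropLast.reverse := by
  rcases List.eq_nil_or_concat s with rfl | ⟨t, c, rfl⟩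
  · simp
  · simp [List.dropLast_concat]

-- palindrome destruction: the second half is the mirror of the first
theorem pal_drop (d : List Char) (hpal : d.reverse = d) (h : ℕ) (hh : h ≤ d.length) :
    d.drop h = (d.take (d.length - h)).reverse := by
  conv_lhs => rw [← hpal]
  rw [List.drop_reverse]

def encOdd (half : ℕ) : List Char := binDigits half ++ (binDigits half).dropLast.reverse
def encEven (half : ℕ) : List Char := binDigits half ++ (binDigits half).reverse
def palsLC (H : ℕ) : List (List Char) :=
  (List.range' 1 H).flatMap fun h =>
    (List.range' (2 ^ (h - 1)) (2 ^ (h - 1))).flatMap fun half => [encOdd half, encEven half]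

def GoodPal (s : List Char) : Prop := s.head? = some '1' ∧ Bin01 s ∧ s.reverse = s

theorem bitLen_eq (h half : ℕ) (h1 : 2 ^ (h - 1) ≤ half) (h2 : half < 2 ^ h) (hh : 1 ≤ h) :
    bitLen half = h := by
  have ha : bitLen half ≤ h := (bitLen_le_iff h half).2 h2
  have hb : ¬ bitLen half ≤ h - 1 := fun hc => by
    have := (bitLen_le_iff (h - 1) half).1 hc; omega
  omega

theorem length_enc (h half : ℕ) (h1 : 2 ^ (h - 1) ≤ half) (h2 : half < 2 ^ h) (hh : 1 ≤ h) :
    (encOdd half).length = 2 * h - 1 ∧ (encEven half).length = 2 * h := by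
  have hl : (binDigits half).length = h := by
    rw [length_binDigits, bitLen_eq h half h1 h2 hh]
  have hne : half ≠ 0 := by
    have : 0 < 2 ^ (h - 1) := Nat.two_pow_pos _
    omega
  constructor <;> simp [encOdd, encEven, hl] <;> omega

theorem goodPal_enc (half : ℕ) (hne : half ≠ 0) :
    GoodPal (encOdd half) ∧ GoodPal (encEven half) := by
  have hnil : binDigits half ≠ [] := by simp [binDigits_eq_nil_iff, hne]
  have hhd : (binDigits half).head? = some '1' := head_binDigits half hne
  have hb : Bin01 (binDigits half) := fun c hc => mem_binDigits half c hc
  refine ⟨⟨?_, ?_, pal_odd _⟩, ⟨?_, ?_, pal_even _⟩⟩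
  · rw [encOdd, List.head?_append_of_ne_nil _ hnil]; exact hhd
  · intro c hc
    rcases List.mem_append.1 hc with hc | hc
    · exact hb c hc
    · exact hb c (List.dropLast_sublist _ |>.subset (List.mem_reverse.1 hc))
  · rw [encEven, List.head?_append_of_ne_nil _ hnil]; exact hhd
  · intro c hc
    rcases List.mem_append.1 hc with hc | hc
    · exact hb c hc
    · exact hb c (List.mem_reverse.1 hc)

theorem mem_range1 (a n m : ℕ) : m ∈ List.range' a n ↔ a ≤ m ∧ m < a + n := by
  rw [List.mem_range']
  constructor
  · rintro ⟨i, hi, rfl⟩; omega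
  · rintro ⟨h1, h2⟩; exact ⟨m - a, by omega, by omega⟩

theorem mem_palsLC (H : ℕ) (s : List Char) :
    s ∈ palsLC H ↔ GoodPal s ∧ 1 ≤ s.length ∧ s.length ≤ 2 * H := by
  simp only [palsLC, List.mem_flatMap, mem_range1]
  constructor
  · rintro ⟨h, ⟨hh1, hh2⟩, half, ⟨hf1, hf2⟩, hs⟩
    have h1 : 2 ^ (h - 1) ≤ half := by omega
    have h2 : half < 2 ^ h := by
      have : 2 ^ (h - 1) + 2 ^ (h - 1) = 2 ^ h := by
        rw [← two_mul, ← pow_succ']; congr 1; omega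
      omega
    have hne : half ≠ 0 := by
      have : 0 < 2 ^ (h - 1) := Nat.two_pow_pos _
      omega
    have hlen := length_enc h half h1 h2 (by omega)
    have hgood := goodPal_enc half hne
    simp only [List.mem_cons, List.mem_singleton] at hs
    rcases hs with rfl | rfl | h'
    · exact ⟨hgood.1, by omega, by omega⟩
    · exact ⟨hgood.2, by omega, by omega⟩
    · cases h'
  · rintro ⟨⟨hhd, hb, hpal⟩, hl1, hl2⟩
    set ℓ := s.length with hℓ
    set h := (ℓ + 1) / 2 with hhdef
    have hhl : h ≤ ℓ := by omega
    set t := s.take h with ht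
    set half := intOfBin t with hhalf
    have htl : t.length = h := by rw [ht, List.length_take]; omega
    have hthd : t.head? = some '1' := by
      rw [ht, List.head?_take]
      simp only [hhd]
      split
      · omega
      · rfl
    have htb : Bin01 t := fun c hc => hb c (List.take_subset _ _ hc)
    have hrt : binDigits half = t := binDigits_intOfBin t htb hthd
    have hbl : bitLen half = h := by rw [← length_binDigits, hrt, htl]
    have hf1 : 2 ^ (h - 1) ≤ half := by
      by_contra hc
      have := (bitLen_le_iff (h - 1) half).2 (by omega)
      omega
    have hf2 : half < 2 ^ h := (bitLen_le_iff h half).1 (by omega)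
    have hpow : 2 ^ (h - 1) + 2 ^ (h - 1) = 2 ^ h := by
      rw [← two_mul, ← pow_succ']; congr 1; omega
    refine ⟨h, ⟨by omega, by omega⟩, half, ⟨by omega, by omega⟩, ?_⟩
    simp only [List.mem_cons, List.mem_singleton]
    -- s = take h ++ (take (ℓ - h)).reverse
    have hsplit : s = t ++ (s.take (ℓ - h)).reverse := by
      conv_lhs => rw [← List.take_append_drop h s]
      rw [pal_drop s hpal h hhl]
    by_cases hpar : ℓ = 2 * h
    · right; left
      rw [encEven, hrt, hsplit]
      congr 2
      rw [ht]; congr 1; omega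
    · left
      have hodd : ℓ = 2 * h - 1 ∧ 1 ≤ h := by omega
      rw [encOdd, hrt, hsplit]
      congr 2
      rw [ht, List.dropLast_eq_take, List.take_take, List.length_take]
      congr 1
      omega

theorem nodup_palsLC (H : ℕ) : (palsLC H).Nodup := by
  rw [palsLC, List.nodup_flatMap]
  have hlenmem : ∀ h, 1 ≤ h → ∀ s ∈ (List.range' (2 ^ (h - 1)) (2 ^ (h - 1))).flatMap
      (fun half => [encOdd half, encEven half]), s.length = 2 * h - 1 ∨ s.length = 2 * h := by
    intro h hh s hs
    rw [List.mem_flatMap] at hs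
    obtain ⟨half, hmem, hs⟩ := hs
    rw [mem_range1] at hmem
    have h2 : half < 2 ^ h := by
      have : 2 ^ (h - 1) + 2 ^ (h - 1) = 2 ^ h := by
        rw [← two_mul, ← pow_succ']; congr 1; omega
      omega
    have hlen := length_enc h half (by omega) h2 hh
    simp only [List.mem_cons, List.mem_singleton] at hs
    rcases hs with rfl | rfl | h' <;> [left; right; cases h'] <;> omega
  constructor
  · intro h hmem
    rw [mem_range1] at hmem
    have hh : 1 ≤ h := hmem.1
    rw [List.nodup_flatMap]
    constructor
    · intro half hmemf
      rw [mem_range1] at hmemf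
      have h2 : half < 2 ^ h := by
        have : 2 ^ (h - 1) + 2 ^ (h - 1) = 2 ^ h := by
          rw [← two_mul, ← pow_succ']; congr 1; omega
        omega
      have hlen := length_enc h half (by omega) h2 hh
      simp only [List.nodup_cons, List.mem_singleton, List.not_mem_nil, List.nodup_nil]
      refine ⟨?_, by simp⟩
      intro heq
      have := congrArg List.length heq
      simp only [List.mem_singleton] at this ⊢
      omega
    · refine (List.nodup_range').imp_of_mem ?_
      intro a b ha hb hne
      rw [mem_range1] at ha hb
      intro s hsa hsb
      have hpow : 2 ^ (h - 1) + 2 ^ (h - 1) = 2 ^ h := by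
        rw [← two_mul, ← pow_succ']; congr 1; omega
      have hA : a ≠ 0 := by have := Nat.two_pow_pos (h - 1); omega
      have hB : b ≠ 0 := by have := Nat.two_pow_pos (h - 1); omega
      have hla : (binDigits a).length = h := by
        rw [length_binDigits, bitLen_eq h a (by omega) (by omega) hh]
      have hlb : (binDigits b).length = h := by
        rw [length_binDigits, bitLen_eq h b (by omega) (by omega) hh]
      -- s.take h = binDigits a and = binDigits b
      have hta : s.take h = binDigits a := by
        simp only [List.mem_cons, List.mem_singleton, List.not_mem_nil, or_false] at hsa
        rcases hsa with rfl | rfl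
        · rw [encOdd, ← hla, List.take_left]
        · rw [encEven, ← hla, List.take_left]
      have htb : s.take h = binDigits b := by
        simp only [List.mem_cons, List.mem_singleton, List.not_mem_nil, or_false] at hsb
        rcases hsb with rfl | rfl
        · rw [encOdd, ← hlb, List.take_left]
        · rw [encEven, ← hlb, List.take_left]
      apply hne
      have := hta.symm.trans htb
      have := congrArg intOfBin this
      rwa [intOfBin_binDigits, intOfBin_binDigits] at this
  · refine (List.nodup_range').imp_of_mem ?_
    intro a b ha hb hne
    rw [mem_range1] at ha hb
    intro s hsa hsb
    have h1 := hlenmem a (by omega) s hsa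
    have h2 := hlenmem b (by omega) s hsb
    omega


-- counting glue

def predA (num : Int) : Bool :=
  decide (pyBin num = (pyBin num).reverse ∧ (pyBin num).count '1' % 2 = 0)

theorem loopA_eq (R : Int) (l : List Int) (c : Int) (h : ∀ x ∈ l, ¬ x > R) :
    loopA R l c = c + (l.countP predA : Int) := by
  induction l generalizing c with
  | nil => simp [loopA]
  | cons num rest ih =>
    rw [loopA]
    simp only [if_neg (h num (by simp))]
    rw [List.countP_cons]
    have hrest : ∀ x ∈ rest, ¬ x > R := fun x hx => h x (by simp [hx])
    by_cases hp : pyBin num = (pyBin num).reverse ∧ (pyBin num).count '1' % 2 = 0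
    · rw [if_pos hp, ih _ hrest]
      have hb : predA num = true := decide_eq_true hp
      rw [hb]
      push_cast
      simp
      ring
    · rw [if_neg hp, ih _ hrest]
      have hb : predA num = false := decide_eq_false hp
      rw [hb]
      push_cast
      simp

theorem foldl_flat {α β : Type} (l : List α) (f : α → List β) (step : Int → β → Int) (c : Int) :
    l.foldl (fun c x => (f x).foldl step c) c = (l.flatMap f).foldl step c := by
  induction l generalizing c with
  | nil => simp
  | cons x xs ih => simp only [List.foldl_cons, List.flatMap_cons, List.foldl_append, ih]

theorem foldl_ifcount {α : Type} (q : α → Bool) (l : List α) (c : Int) :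
    l.foldl (fun c x => if q x then c + 1 else c) c = c + (l.countP q : Int) := by
  induction l generalizing c with
  | nil => simp
  | cons x xs ih =>
    simp only [List.foldl_cons, List.countP_cons]
    by_cases h : q x = true
    · rw [if_pos h, ih]; simp [h]; push_cast; ring
    · rw [if_neg h, ih]; simp [h]

theorem flatMap_congr_mem {α β : Type} (l : List α) (f g : α → List β)
    (h : ∀ x ∈ l, f x = g x) : l.flatMap f = l.flatMap g := by
  induction l with
  | nil => simp
  | cons x xs ih =>
    simp only [List.flatMap_cons]
    rw [h x (by simp), ih (fun y hy => h y (by simp [hy]))]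

theorem predA_neg (n : Int) (h : n < 0) : predA n = false := by
  apply decide_eq_false
  rintro ⟨hpal, -⟩
  rw [pyBin, if_pos h] at hpal
  have hdne : binDigits (-n).toNat ≠ [] := by
    rw [Ne, binDigits_eq_nil_iff]
    omega
  obtain ⟨t, c, hd⟩ := (List.eq_nil_or_concat (binDigits (-n).toNat)).resolve_left hdne
  rw [List.concat_eq_append] at hd
  rw [hd] at hpal
  have h2 : ('b' :: (t ++ [c])).getLast? = some 'b' := by
    rw [hpal, List.reverse_cons, List.getLast?_concat]
  rw [show ('b' :: (t ++ [c])) = ('b' :: t) ++ [c] by simp, List.getLast?_concat] at h2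
  have hc : c ∈ binDigits (-n).toNat := by rw [hd]; simp
  rcases mem_binDigits _ _ hc with h4 | h4 <;> rw [h4] at h2 <;> simp at h2

theorem predA_zero : predA 0 = true := by decide

theorem pyBin_pos (n : Int) (h : 1 ≤ n) : pyBin n = binDigits n.toNat := by
  rw [pyBin, if_neg (by omega), if_neg (by omega)]

theorem main_count (L hi : Int) (hhi : 1 ≤ hi) :
    ((PySem.List.pyRange (max L 1) (hi + 1) 1).countP predA : Int) =
    ((palsLC ((bitLen hi.toNat + 1) / 2)).countP (fun pal =>
      decide (¬ pal.length > bitLen hi.toNat ∧ L ≤ (intOfBin pal : Int) ∧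
        (intOfBin pal : Int) ≤ hi ∧ pal.count '1' % 2 = 0)) : Int) := by
  set nbits := bitLen hi.toNat with hn
  set H := (nbits + 1) / 2 with hH
  set qB : List Char → Bool := fun pal =>
      decide (¬ pal.length > nbits ∧ L ≤ (intOfBin pal : Int) ∧
        (intOfBin pal : Int) ≤ hi ∧ pal.count '1' % 2 = 0) with hqB
  set F1 := (PySem.List.pyRange (max L 1) (hi + 1) 1).filter predA with hF1
  set F2 := (palsLC H).filter qB with hF2
  have hperm : (F2.map fun pal => (intOfBin pal : Int)).Perm F1 := by
    rw [List.perm_ext_iff_of_nodup]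
    · intro x
      simp only [List.mem_map, hF1, hF2, List.mem_filter,
        PySem.List.mem_pyRange_one]
      constructor
      · rintro ⟨pal, ⟨hmem, hq⟩, rfl⟩
        obtain ⟨⟨hhd, hb, hrev⟩, hl1, hl2⟩ := (mem_palsLC H pal).1 hmem
        obtain ⟨hlen, hL, hhiB, hev⟩ := of_decide_eq_true hq
        have hm1 : 1 ≤ intOfBin pal := intOfBin_pos pal hhd
        have hrt : binDigits (intOfBin pal) = pal := binDigits_intOfBin pal hb hhd
        refine ⟨⟨?_, by omega⟩, ?_⟩
        · omega
        · apply decide_eq_true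
          rw [pyBin_pos _ (by omega), Int.toNat_natCast, hrt]
          exact ⟨hrev.symm, hev⟩
      · rintro ⟨⟨hlo, hx⟩, hp⟩
        have hx1 : 1 ≤ x := le_trans (by omega) hlo
        obtain ⟨hrev', hev'⟩ := of_decide_eq_true hp
        rw [pyBin_pos _ hx1] at hrev' hev'
        have hmx : (x.toNat : Int) = x := Int.toNat_of_nonneg (by omega)
        have hmne : x.toNat ≠ 0 := by omega
        have hble : bitLen x.toNat ≤ nbits := by
          rw [bitLen_le_iff]
          have h1 : hi.toNat < 2 ^ nbits := (bitLen_le_iff nbits hi.toNat).1 (by omega)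
          omega
        have hlenpal : (binDigits x.toNat).length = bitLen x.toNat := length_binDigits _
        have hge1 : 1 ≤ bitLen x.toNat := by
          by_contra hc
          have := (bitLen_le_iff 0 x.toNat).1 (by omega)
          omega
        have hmem : binDigits x.toNat ∈ palsLC H := by
          rw [mem_palsLC]
          refine ⟨⟨head_binDigits _ hmne, fun c hc => mem_binDigits _ c hc, hrev'.symm⟩, ?_, ?_⟩
          · omega
          · omega
        have hio : intOfBin (binDigits x.toNat) = x.toNat := intOfBin_binDigits _
        refine ⟨binDigits x.toNat, ⟨hmem, ?_⟩, by rw [hio]; exact hmx⟩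
        apply decide_eq_true
        rw [hio]
        refine ⟨by omega, by omega, by omega, hev'⟩
    · apply List.Nodup.map_on
      · intro a ha b hb hab
        rw [hF2, List.mem_filter] at ha hb
        obtain ⟨⟨hhda, hba, -⟩, -, -⟩ := (mem_palsLC H a).1 ha.1
        obtain ⟨⟨hhdb, hbb, -⟩, -, -⟩ := (mem_palsLC H b).1 hb.1
        have : intOfBin a = intOfBin b := by exact_mod_cast hab
        calc a = binDigits (intOfBin a) := (binDigits_intOfBin a hba hhda).symm
          _ = binDigits (intOfBin b) := by rw [this]
          _ = b := binDigits_intOfBin b hbb hhdb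
      · exact (nodup_palsLC H).filter _
    · exact (PySem.List.nodup_pyRange_one _ _).filter _
  have hlen := hperm.length_eq
  rw [List.length_map] at hlen
  rw [List.countP_eq_length_filter, List.countP_eq_length_filter, ← hF1, ← hF2, ← hlen]

def stepB (nbits : ℕ) (L hi : Int) : Int → List Char → Int := fun count pal =>
  if pal.length > nbits then count
  else if L ≤ (intOfBin pal : Int) ∧ (intOfBin pal : Int) ≤ hi ∧
      pal.count '1' % 2 = 0 then count + 1 else count

theorem alt_eq (L R : Int) :
    sol_014_alt L R =
      (if L ≤ 0 ∧ 0 ≤ min R (L + 199999) then (1 : Int) else 0) +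
      (if 1 ≤ min R (L + 199999) then
        ((palsLC ((bitLen (min R (L + 199999)).toNat + 1) / 2)).countP (fun pal =>
          decide (¬ pal.length > bitLen (min R (L + 199999)).toNat ∧ L ≤ (intOfBin pal : Int) ∧
            (intOfBin pal : Int) ≤ min R (L + 199999) ∧ pal.count '1' % 2 = 0)) : Int)
       else 0) := by
  by_cases hge : 1 ≤ min R (L + 199999)
  · simp only [sol_014_alt, if_pos hge]
    set hi := min R (L + 199999) with hhi
    set nbits := bitLen hi.toNat with hn
    set H := (nbits + 1) / 2 with hH
    set c0 : Int := if L ≤ 0 ∧ 0 ≤ hi then 1 else 0 with hc0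
    have hfold : ∀ (c : Int),
        (List.range' 1 H).foldl (fun count h =>
          (List.range' (2 ^ (h - 1)) (2 ^ h - 2 ^ (h - 1))).foldl (fun count half =>
            [binDigits half ++ (binDigits half).dropLast.reverse,
             binDigits half ++ (binDigits half).reverse].foldl (stepB nbits L hi) count)
            count) c
        = c + (((palsLC H).countP (fun pal =>
            decide (¬ pal.length > nbits ∧ L ≤ (intOfBin pal : Int) ∧
              (intOfBin pal : Int) ≤ hi ∧ pal.count '1' % 2 = 0))) : Int) := by
      intro c
      have e1 : ∀ (c : Int) (h : ℕ),
          (List.range' (2 ^ (h - 1)) (2 ^ h - 2 ^ (h - 1))).foldl (fun count half =>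
            [binDigits half ++ (binDigits half).dropLast.reverse,
             binDigits half ++ (binDigits half).reverse].foldl (stepB nbits L hi) count) c
          = ((List.range' (2 ^ (h - 1)) (2 ^ h - 2 ^ (h - 1))).flatMap
              (fun half => [encOdd half, encEven half])).foldl (stepB nbits L hi) c := by
        intro c h
        exact foldl_flat _ _ _ _
      calc (List.range' 1 H).foldl (fun count h =>
          (List.range' (2 ^ (h - 1)) (2 ^ h - 2 ^ (h - 1))).foldl (fun count half =>
            [binDigits half ++ (binDigits half).dropLast.reverse,
             binDigits half ++ (binDigits half).reverse].foldl (stepB nbits L hi) count)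
            count) c
          = (List.range' 1 H).foldl (fun count h =>
            ((List.range' (2 ^ (h - 1)) (2 ^ h - 2 ^ (h - 1))).flatMap
              (fun half => [encOdd half, encEven half])).foldl (stepB nbits L hi) count) c := by
            apply PySem.List.foldl_congr_mem
            intro acc x hx
            exact e1 acc x
        _ = ((List.range' 1 H).flatMap (fun h =>
              (List.range' (2 ^ (h - 1)) (2 ^ h - 2 ^ (h - 1))).flatMap
                (fun half => [encOdd half, encEven half]))).foldl (stepB nbits L hi) c := by
            exact foldl_flat _ _ _ _
        _ = (palsLC H).foldl (stepB nbits L hi) c := by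
            congr 1
            rw [palsLC]
            apply flatMap_congr_mem
            intro h hh
            rw [mem_range1] at hh
            have hpow : 2 ^ (h - 1) + 2 ^ (h - 1) = 2 ^ h := by
              rw [← two_mul, ← pow_succ']; congr 1; omega
            have hpow2 : 2 ^ h - 2 ^ (h - 1) = 2 ^ (h - 1) := by
              rw [← hpow, Nat.add_sub_cancel]
            rw [hpow2]
        _ = c + (((palsLC H).countP (fun pal =>
            decide (¬ pal.length > nbits ∧ L ≤ (intOfBin pal : Int) ∧
              (intOfBin pal : Int) ≤ hi ∧ pal.count '1' % 2 = 0))) : Int) := by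
            rw [show stepB nbits L hi = fun (c : Int) pal =>
                if (fun pal => decide (¬ pal.length > nbits ∧ L ≤ (intOfBin pal : Int) ∧
                  (intOfBin pal : Int) ≤ hi ∧ pal.count '1' % 2 = 0)) pal then c + 1 else c by
              funext c pal
              rw [stepB]
              by_cases h1 : pal.length > nbits
              · simp [h1]
              · by_cases h2 : L ≤ (intOfBin pal : Int) ∧ (intOfBin pal : Int) ≤ hi ∧
                    pal.count '1' % 2 = 0
                · simp [h1, h2]
                · simp [h1, h2]]
            exact foldl_ifcount _ _ _
    exact hfold c0
  · simp only [sol_014_alt, if_neg hge]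
    ring

theorem sol_014_main : ∀ (L R : Int), sol_014 L R = sol_014_alt L R := by
  intro L R
  have hlim : min (R + 1) (L + 200000) = min R (L + 199999) + 1 := by omega
  have hA : sol_014 L R = ((PySem.List.pyRange L (min R (L + 199999) + 1) 1).countP predA : Int) := by
    rw [sol_014, hlim, loopA_eq]
    · simp
    · intro x hx
      rw [PySem.List.mem_pyRange_one] at hx
      omega
  rw [hA, alt_eq]
  set hi := min R (L + 199999) with hhi
  have hsplit : ((PySem.List.pyRange L (hi + 1) 1).countP predA : Int)
      = (if L ≤ 0 ∧ 0 ≤ hi then (1 : Int) else 0)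
        + ((PySem.List.pyRange (max L 1) (hi + 1) 1).countP predA : Int) := by
    by_cases hL1 : 1 ≤ L
    · rw [max_eq_left hL1, if_neg (by omega)]
      ring
    · have hL0 : L ≤ 0 := by omega
      rw [max_eq_right (by omega)]
      by_cases hge : 0 ≤ hi
      · rw [PySem.List.pyRange_one_append L 1 (hi + 1) (by omega) (by omega), List.countP_append]
        have h01 : PySem.List.pyRange 0 1 1 = [0] := by
          have := PySem.List.pyRange_one_singleton (a := (0 : Int))
          norm_num at this
          exact this
        rw [PySem.List.pyRange_one_append L 0 1 (by omega) (by omega),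
          List.countP_append, h01]
        have hz : (PySem.List.pyRange L 0 1).countP predA = 0 := by
          rw [List.countP_eq_zero]
          intro x hx
          rw [PySem.List.mem_pyRange_one] at hx
          simp [predA_neg x (by omega)]
        rw [hz]
        simp only [List.countP_cons, List.countP_nil, predA_zero]
        have hif : (if L ≤ 0 ∧ 0 ≤ hi then (1 : Int) else 0) = 1 := if_pos ⟨hL0, hge⟩
        rw [hif]
        push_cast
        ring
      · have h1 : (PySem.List.pyRange L (hi + 1) 1).countP predA = 0 := by
          rw [List.countP_eq_zero]
          intro x hx
          rw [PySem.List.mem_pyRange_one] at hx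
          simp [predA_neg x (by omega)]
        have h2 : (PySem.List.pyRange 1 (hi + 1) 1) = [] :=
          PySem.List.pyRange_one_eq_nil (by omega)
        rw [h1, h2, if_neg (by omega)]
        simp
  rw [hsplit]
  by_cases hge1 : 1 ≤ hi
  · rw [if_pos hge1, main_count L hi hge1]
  · rw [if_neg hge1]
    have h2 : (PySem.List.pyRange (max L 1) (hi + 1) 1) = [] :=
      PySem.List.pyRange_one_eq_nil (by omega)
    rw [h2]
    simp

-- ===== VERDICT (by name: the statement is the Claim_ definition above) =====
theorem sol_014_spec : Claim_equal_sol_014 := by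
  intro L R _
  exact sol_014_main L R
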